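-- pv_equiv track=rewrite | github.com/seven320/AtCoder | 7/D.py | cnt_bans
-- ===== SOURCE A (Python) =====
-- def cnt_bans(x):
--     x = list(map(int, list("{:020}".format(x))))
--     dp = [[0, 0] for i in range(21)]
--     dp[0][0] = 1
--     for i in range(20):
--         c = x[i]
--         for j in [0, 1, 2, 3, 5, 6, 7, 8]:
--             if j < c:
--                 dp[i + 1][1] += dp[i][1] + dp[i][0]
--             elif j == c:
--                 dp[i + 1][0] += dp[i][0]
--                 dp[i + 1][1] += dp[i][1]
--             else:
--                 dp[i + 1][1] += dp[i][1]
--     return dp[-1][0] + dp[-1][1] - 1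
-- ===== SOURCE B (Python) =====
-- def cnt_bans(x):
--     s = "{:020}".format(x)
--     count = 0
--     for i in range(20):
--         c = int(s[i])
--         count += sum(1 for j in (0, 1, 2, 3, 5, 6, 7, 8) if j < c) * 8 ** (19 - i)
--         if c == 4 or c == 9:
--             break
--     else:
--         count += 1
--     return count - 1
-- ===== Notes on version B (the rewrite author's own statement) =====
-- stated objective: simpler
-- what changed: Replaced the 21x2 tight/free DP table with a single greedy pass that adds (#allowed digits below the current digit) * 8^remaining per position and stops at the first banned digit (for/else adds 1 if none).
import Mathlib
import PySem

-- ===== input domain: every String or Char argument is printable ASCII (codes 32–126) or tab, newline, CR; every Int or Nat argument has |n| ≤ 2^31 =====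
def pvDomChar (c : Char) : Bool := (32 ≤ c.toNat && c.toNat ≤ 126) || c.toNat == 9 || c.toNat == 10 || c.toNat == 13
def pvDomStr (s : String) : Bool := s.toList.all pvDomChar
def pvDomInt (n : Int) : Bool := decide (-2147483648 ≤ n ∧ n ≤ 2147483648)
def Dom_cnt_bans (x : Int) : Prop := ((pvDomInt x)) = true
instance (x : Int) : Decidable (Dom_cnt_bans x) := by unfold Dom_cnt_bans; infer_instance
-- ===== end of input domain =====

-- B replaces A's 21x2 tight/free DP table by a single greedy positional pass (break at the
-- first banned digit, for/else adds 1); equivalence of the RETURN values is proved on 0 ≤ x.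

-- Shared hand-port of `list(map(int, "{:020}".format(x)))` (a library call both sources make):
-- the 20 decimal digits of x, most significant first. Exact for 0 ≤ x < 10^20 (Pre_ gives
-- 0 ≤ x and Dom_ gives x ≤ 2^31 < 10^20; Lean's `/`,`%` agree with Python's there).
def pad20 (x : Int) : List Int := (List.range 20).map (fun k => x / 10 ^ (19 - k) % 10)

-- ===== PORT A =====
-- one step of A's inner `for j in [0,1,2,3,5,6,7,8]` loop body, building dp[i+1] from dp[i]
def stepA (dp : Int × Int) (c : Int) : Int × Int :=
  ([0, 1, 2, 3, 5, 6, 7, 8] : List Int).foldl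
    (fun nd j =>
      if j < c then (nd.1, nd.2 + dp.2 + dp.1)
      else if j = c then (nd.1 + dp.1, nd.2 + dp.2)
      else (nd.1, nd.2 + dp.2))
    (0, 0)

def cnt_bans (x : Int) : Int :=
  let xs := pad20 x
  let dpN := xs.foldl stepA (1, 0)
  dpN.1 + dpN.2 - 1

-- ===== PORT B =====
-- the greedy loop of Source B: i is the position, cnt the running count; `[]` is the for/else branch
def goB (cnt : Int) (i : Nat) : List Int → Int
  | [] => cnt + 1
  | c :: rest =>
    let cnt' := cnt + (([0, 1, 2, 3, 5, 6, 7, 8] : List Int).filter (· < c)).length * 8 ^ (19 - i)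
    if c = 4 ∨ c = 9 then cnt' else goB cnt' (i + 1) rest

def cnt_bans_alt (x : Int) : Int := goB 0 0 (pad20 x) - 1

-- ===== PRECONDITION & SPEC =====
-- Pre_ excludes x < 0, on which the Python A raises ValueError (int('-') on the sign character).
def Pre_cnt_bans (x : Int) : Prop := 0 ≤ x
instance (x : Int) : Decidable (Pre_cnt_bans x) := by unfold Pre_cnt_bans; infer_instance
def pvWitness_cnt_bans : Int := 103

def Spec_cnt_bans (x : Int) (out : Int) : Prop := out = cnt_bans_alt x
instance (x : Int) (out : Int) : Decidable (Spec_cnt_bans x out) := by unfold Spec_cnt_bans; infer_instance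

-- ===== CLAIM (what is proved, stated in full; the proofs are below) =====
def Claim_equal_cnt_bans : Prop := ∀ (x : Int), Dom_cnt_bans x → Pre_cnt_bans x → Spec_cnt_bans x (cnt_bans x)

-- ===== LEMMAS AND PROOFS =====

-- abbreviations used only by the proofs
def lcnt (c : Int) : Int := (([0, 1, 2, 3, 5, 6, 7, 8] : List Int).filter (· < c)).length
def ecnt (c : Int) : Int := if c = 4 ∨ c = 9 then 0 else 1

lemma stepA_eq (c : Int) (h0 : 0 ≤ c) (h1 : c < 10) (t f : Int) :
    stepA (t, f) c = (ecnt c * t, lcnt c * t + 8 * f) := by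
  interval_cases c <;> simp [stepA, lcnt, ecnt, List.foldl, List.filter] <;> ring_nf

lemma goB_add : ∀ (ds : List Int) (cnt : Int) (i : Nat), goB cnt i ds = cnt + goB 0 i ds := by
  intro ds
  induction ds with
  | nil => intro cnt i; simp [goB]
  | cons c rest ih =>
    intro cnt i
    simp only [goB]
    split_ifs with h
    · ring
    · rw [ih (cnt + _) (i + 1), ih (0 + _) (i + 1)]
      ring

lemma foldA_zero : ∀ (ds : List Int) (f : Int), (∀ c ∈ ds, 0 ≤ c ∧ c < 10) →
    ((ds.foldl stepA (0, f)).1 + (ds.foldl stepA (0, f)).2) = 8 ^ ds.length * f := by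
  intro ds
  induction ds with
  | nil => intro f _; simp
  | cons c rest ih =>
    intro f hb
    have hc := hb c (by simp)
    rw [List.foldl_cons, stepA_eq c hc.1 hc.2]
    simp only [mul_zero, zero_add]
    rw [ih (8 * f) (fun d hd => hb d (by simp [hd]))]
    simp only [List.length_cons]
    ring

lemma foldA_one : ∀ (ds : List Int) (i : Nat) (f : Int), (∀ c ∈ ds, 0 ≤ c ∧ c < 10) →
    ds.length + i = 20 →
    ((ds.foldl stepA (1, f)).1 + (ds.foldl stepA (1, f)).2) = goB 0 i ds + 8 ^ ds.length * f := by
  intro ds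
  induction ds with
  | nil => intro i f _ _; simp [goB]
  | cons c rest ih =>
    intro i f hb hlen
    have hc := hb c (by simp)
    have hr : rest.length + (i + 1) = 20 := by simp at hlen; omega
    have hexp : 19 - i = rest.length := by omega
    rw [List.foldl_cons, stepA_eq c hc.1 hc.2]
    simp only [goB, hexp, ecnt]
    split_ifs with h
    · rw [zero_mul, foldA_zero rest _ (fun d hd => hb d (by simp [hd]))]
      simp only [lcnt, List.length_cons, zero_add]
      ring
    · rw [one_mul, ih (i + 1) _ (fun d hd => hb d (by simp [hd])) hr,
          goB_add rest (0 + _) (i + 1)]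
      simp only [lcnt, List.length_cons]
      ring

lemma pad20_bounded (x : Int) : ∀ c ∈ pad20 x, 0 ≤ c ∧ c < 10 := by
  intro c hc
  simp [pad20] at hc
  obtain ⟨k, -, hk⟩ := hc
  constructor
  · rw [← hk]; exact Int.emod_nonneg _ (by norm_num)
  · rw [← hk]; exact Int.emod_lt_of_pos _ (by norm_num)

lemma pad20_len (x : Int) : (pad20 x).length = 20 := by simp [pad20]

-- ===== VERDICT (by name: the statement is the Claim_ definition above) =====
theorem cnt_bans_spec : Claim_equal_cnt_bans := by
  intro x _ _
  unfold Spec_cnt_bans cnt_bans cnt_bans_alt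
  have h := foldA_one (pad20 x) 0 0 (pad20_bounded x) (by rw [pad20_len])
  simp at h
  simp [h]
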